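-- pv_equiv track=rewrite | github.com/FlavienRx/holy_shiit_bot | holy_shiit_bot_module.py | average_size_by_char
-- ===== SOURCE A (Python) =====
-- def average_size_by_char(sentence):
--
--     # Set the big letters of the font
--     big_chars = ['m', 'u', 'c', 'w', 'v']
--     # Set the little letters of the font
--     little_chars = ['l', 'i', 'j']
--     # Initialize the weight
--     weight = 0
--
--     # Compute the sentence's weight
--     for big_char in big_chars:
--         weight = weight + sentence.count(big_char)
--
--     for little_char in little_chars:
--         weight = weight - sentence.count(little_char)
--
--     # fix an average size by char
--     if weight < -2:
--         average_size = 13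
--     elif weight < 0:
--         average_size = 15
--     elif weight < 2:
--         average_size = 17
--     elif weight < 4:
--         average_size = 18
--     else:
--         average_size = 20
--
--     return average_size
-- ===== SOURCE B (Python) =====
-- def average_size_by_char(sentence):
--     # One pass over the sentence with a weight table:
--     # big font letters weigh +1, little ones -1, everything else 0.
--     table = {'m': 1, 'u': 1, 'c': 1, 'w': 1, 'v': 1, 'l': -1, 'i': -1, 'j': -1}
--     weight = 0
--     for char in sentence:
--         weight += table.get(char, 0)
--
--     if weight < -2:
--         return 13
--     elif weight < 0:
--         return 15
--     elif weight < 2: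
--         return 17
--     elif weight < 4:
--         return 18
--     return 20
-- ===== Notes on version B (the rewrite author's own statement) =====
-- stated objective: simpler
-- what changed: Replaces the eight separate sentence.count scans with a single pass over the sentence accumulating a per-character weight from a +1/-1 lookup table; the threshold ladder is unchanged.
import Mathlib
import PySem

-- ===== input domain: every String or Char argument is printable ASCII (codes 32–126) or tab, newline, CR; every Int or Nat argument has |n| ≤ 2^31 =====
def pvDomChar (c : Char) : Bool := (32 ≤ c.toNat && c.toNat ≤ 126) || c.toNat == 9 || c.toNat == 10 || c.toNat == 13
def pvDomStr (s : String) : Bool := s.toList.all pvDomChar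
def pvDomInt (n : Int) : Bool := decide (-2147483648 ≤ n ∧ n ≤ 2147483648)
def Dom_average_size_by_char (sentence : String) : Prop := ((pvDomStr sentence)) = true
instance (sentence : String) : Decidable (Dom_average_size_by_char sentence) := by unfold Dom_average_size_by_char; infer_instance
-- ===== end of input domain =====

set_option maxHeartbeats 1000000


-- B replaces A's eight sentence.count scans by one pass over the sentence with a ±1 weight table (simpler).

-- ===== PORT A =====
def average_size_by_char (sentence : String) : Int :=
  let big_chars : List String := ["m", "u", "c", "w", "v"]
  let little_chars : List String := ["l", "i", "j"]
  let weight : Int := 0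
  let weight := big_chars.foldl (fun w big_char => w + (PySem.Str.count sentence big_char : Int)) weight
  let weight := little_chars.foldl (fun w little_char => w - (PySem.Str.count sentence little_char : Int)) weight
  if weight < -2 then 13
  else if weight < 0 then 15
  else if weight < 2 then 17
  else if weight < 4 then 18
  else 20

-- ===== PORT B =====
def pvWeightTable : PySem.Dict Char Int :=
  (((((((PySem.Dict.empty.insert 'm' 1).insert 'u' 1).insert 'c' 1).insert 'w' 1).insert
      'v' 1).insert 'l' (-1)).insert 'i' (-1)).insert 'j' (-1)

def average_size_by_char_alt (sentence : String) : Int :=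
  let weight := sentence.toList.foldl (fun w char => w + pvWeightTable.getD char 0) 0
  if weight < -2 then 13
  else if weight < 0 then 15
  else if weight < 2 then 17
  else if weight < 4 then 18
  else 20

-- ===== PRECONDITION & SPEC =====
def Spec_average_size_by_char (sentence : String) (out : Int) : Prop := out = average_size_by_char_alt sentence
instance (sentence : String) (out : Int) : Decidable (Spec_average_size_by_char sentence out) := by unfold Spec_average_size_by_char; infer_instance

-- ===== CLAIM (what is proved, stated in full; the proofs are below) =====
def Claim_equal_average_size_by_char : Prop := ∀ (sentence : String), Dom_average_size_by_char sentence → Spec_average_size_by_char sentence (average_size_by_char sentence)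

-- ===== LEMMAS AND PROOFS =====

-- counting one single character as a substring is exactly counting that character
theorem pv_go_singleton (c : Char) : ∀ (fuel : Nat) (l : List Char) (acc : Nat),
    l.length ≤ fuel → PySem.Chars.count.go [c] fuel l acc = acc + l.count c := by
  intro fuel
  induction fuel with
  | zero =>
    intro l acc h
    have hl : l = [] := by cases l with
      | nil => rfl
      | cons x t => simp at h
    subst hl
    simp [PySem.Chars.count.go]
  | succ n ih =>
    intro l acc h
    cases l with
    | nil => simp [PySem.Chars.count.go]
    | cons x t =>
      by_cases hx : c = x
      · subst hx
        have hpre : List.isPrefixOf [c] (c :: t) = true := by simp [List.isPrefixOf]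
        simp only [PySem.Chars.count.go, hpre, if_true, List.length_cons, List.length_nil,
          List.drop_succ_cons, List.drop_zero]
        rw [ih t (acc + 1) (by simp at h; omega)]
        simp
        omega
      · have hpre : List.isPrefixOf [c] (x :: t) = false := by
          simp [List.isPrefixOf, hx]
        simp only [PySem.Chars.count.go, hpre, Bool.false_eq_true, if_false]
        rw [ih t acc (by simp at h; omega)]
        have hxc : ¬x = c := fun h' => hx h'.symm
        simp [hxc]

theorem pv_count_char (s : String) (c : Char) (sub : String) (hsub : sub.toList = [c]) :
    PySem.Str.count s sub = s.toList.count c := by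
  show PySem.Chars.count s.toList sub.toList = _
  rw [hsub]
  unfold PySem.Chars.count
  rw [if_neg (by simp)]
  simpa using pv_go_singleton c s.toList.length s.toList 0 (le_refl _)

theorem pv_table_getD (x : Char) : pvWeightTable.getD x 0 =
    if x = 'j' then -1 else if x = 'i' then -1 else if x = 'l' then -1
    else if x = 'v' then 1 else if x = 'w' then 1 else if x = 'c' then 1
    else if x = 'u' then 1 else if x = 'm' then 1 else 0 := by
  unfold pvWeightTable
  rw [PySem.Dict.getD_insert, PySem.Dict.getD_insert, PySem.Dict.getD_insert,
      PySem.Dict.getD_insert, PySem.Dict.getD_insert, PySem.Dict.getD_insert,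
      PySem.Dict.getD_insert, PySem.Dict.getD_insert, PySem.Dict.getD_empty]

theorem pv_fold_table (l : List Char) : ∀ (a : Int),
    l.foldl (fun w char => w + pvWeightTable.getD char 0) a =
      a + (l.count 'm' : Int) + (l.count 'u' : Int) + (l.count 'c' : Int) + (l.count 'w' : Int)
        + (l.count 'v' : Int) - (l.count 'l' : Int) - (l.count 'i' : Int) - (l.count 'j' : Int) := by
  induction l with
  | nil => intro a; simp
  | cons x t ih =>
    intro a
    simp only [List.foldl_cons, List.count_cons]
    rw [ih, pv_table_getD]
    by_cases h1 : x = 'j'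
    · subst h1; simp; omega
    rw [if_neg h1]
    by_cases h2 : x = 'i'
    · subst h2; simp; omega
    rw [if_neg h2]
    by_cases h3 : x = 'l'
    · subst h3; simp; omega
    rw [if_neg h3]
    by_cases h4 : x = 'v'
    · subst h4; simp; omega
    rw [if_neg h4]
    by_cases h5 : x = 'w'
    · subst h5; simp; omega
    rw [if_neg h5]
    by_cases h6 : x = 'c'
    · subst h6; simp; omega
    rw [if_neg h6]
    by_cases h7 : x = 'u'
    · subst h7; simp; omega
    rw [if_neg h7]
    by_cases h8 : x = 'm'
    · subst h8; simp; omega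
    rw [if_neg h8]
    simp only [beq_iff_eq, h1, h2, h3, h4, h5, h6, h7, h8, if_false]
    push_cast
    omega

theorem average_size_by_char_eq (s : String) :
    average_size_by_char s = average_size_by_char_alt s := by
  have hm := pv_count_char s 'm' "m" (by decide)
  have hu := pv_count_char s 'u' "u" (by decide)
  have hc := pv_count_char s 'c' "c" (by decide)
  have hw := pv_count_char s 'w' "w" (by decide)
  have hv := pv_count_char s 'v' "v" (by decide)
  have hl := pv_count_char s 'l' "l" (by decide)
  have hi := pv_count_char s 'i' "i" (by decide)
  have hj := pv_count_char s 'j' "j" (by decide)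
  unfold average_size_by_char average_size_by_char_alt
  simp only [List.foldl_cons, List.foldl_nil]
  rw [pv_fold_table s.toList 0]
  simp only [hm, hu, hc, hw, hv, hl, hi, hj]

-- ===== VERDICT (by name: the statement is the Claim_ definition above) =====
theorem average_size_by_char_spec : Claim_equal_average_size_by_char := by
  intro s _
  unfold Spec_average_size_by_char
  exact average_size_by_char_eq s
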